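-- pv_equiv track=rewrite | github.com/yashab-cyber/sentinelsec | core/packet_sniffer.py | _get_tcp_flags
-- ===== SOURCE A (Python) =====
-- from typing import Dict, List, Any, Callable, Optional
--
-- def _get_tcp_flags(flags: int) -> List[str]:
--     """Convert TCP flags integer to list of flag names"""
--     flag_names = []
--     flag_map = {
--         0x01: 'FIN',
--         0x02: 'SYN',
--         0x04: 'RST',
--         0x08: 'PSH',
--         0x10: 'ACK',
--         0x20: 'URG',
--         0x40: 'ECE',
--         0x80: 'CWR'
--     }
--
--     for flag_bit, flag_name in flag_map.items():
--         if flags & flag_bit: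
--             flag_names.append(flag_name)
--
--     return flag_names
-- ===== SOURCE B (Python) =====
-- def _get_tcp_flags(flags: int):
--     """Convert TCP flags integer to list of flag names (lowest-set-bit iteration)"""
--     names = {0x01: 'FIN', 0x02: 'SYN', 0x04: 'RST', 0x08: 'PSH',
--              0x10: 'ACK', 0x20: 'URG', 0x40: 'ECE', 0x80: 'CWR'}
--     result = []
--     f = flags & 0xFF
--     while f:
--         low = f & -f          # lowest set bit
--         result.append(names[low])
--         f &= f - 1            # clear it
--     return result
-- ===== Notes on version B (the rewrite author's own statement) =====
-- stated objective: alternative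
-- what changed: Instead of scanning all eight fixed flag positions, B masks flags to the low byte and loops only over its set bits, extracting the lowest set bit with f & -f and clearing it with f &= f-1 each iteration.
import Mathlib
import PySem

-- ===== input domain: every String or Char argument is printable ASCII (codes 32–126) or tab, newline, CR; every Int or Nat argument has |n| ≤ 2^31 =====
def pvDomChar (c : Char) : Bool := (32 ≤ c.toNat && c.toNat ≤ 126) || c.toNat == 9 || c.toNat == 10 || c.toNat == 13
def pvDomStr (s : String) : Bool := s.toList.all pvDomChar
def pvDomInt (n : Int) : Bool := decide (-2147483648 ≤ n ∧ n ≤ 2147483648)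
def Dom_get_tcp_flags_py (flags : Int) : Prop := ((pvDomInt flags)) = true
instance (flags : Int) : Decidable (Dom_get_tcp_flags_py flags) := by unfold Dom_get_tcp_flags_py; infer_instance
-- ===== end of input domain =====

-- B replaces A's scan over all eight fixed flag positions by a lowest-set-bit loop over
-- the set bits of flags & 0xFF only (same output order); objective: alternative.

-- ===== PORT A =====
-- flag_map literal dict (distinct keys, insertion order)
def pvFlagMapA : PySem.Dict Int String :=
  PySem.Dict.ofList [(0x01, "FIN"), (0x02, "SYN"), (0x04, "RST"), (0x08, "PSH"),
                     (0x10, "ACK"), (0x20, "URG"), (0x40, "ECE"), (0x80, "CWR")]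

def get_tcp_flags_py (flags : Int) : List String :=
  pvFlagMapA.items.foldl
    (fun flag_names p =>
      if PySem.Int.band flags p.1 ≠ 0 then flag_names ++ [p.2] else flag_names)
    []

-- ===== PORT B =====
def pvNamesB : PySem.Dict Int String :=
  PySem.Dict.ofList [(0x01, "FIN"), (0x02, "SYN"), (0x04, "RST"), (0x08, "PSH"),
                     (0x10, "ACK"), (0x20, "URG"), (0x40, "ECE"), (0x80, "CWR")]

-- Source B's while loop; f = flags & 0xFF has at most 8 set bits and loses one per
-- iteration, so fuel 8 makes the identical computation total (never exhausted).
-- names[low] is always present in Source B; getD with "" is exact on every reached input.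
def pvBLoop : Nat → Int → List String → List String
  | 0, _, result => result
  | fuel + 1, f, result =>
    if f ≠ 0 then
      pvBLoop fuel (PySem.Int.band f (f - 1))
        (result ++ [pvNamesB.getD (PySem.Int.band f (-f)) ""])
    else result

def get_tcp_flags_py_alt (flags : Int) : List String :=
  pvBLoop 8 (PySem.Int.band flags 255) []

-- ===== PRECONDITION & SPEC =====
def Spec_get_tcp_flags_py (flags : Int) (out : List String) : Prop := out = get_tcp_flags_py_alt flags
instance (flags : Int) (out : List String) : Decidable (Spec_get_tcp_flags_py flags out) := by unfold Spec_get_tcp_flags_py; infer_instance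

-- ===== CLAIM (what is proved, stated in full; the proofs are below) =====
def Claim_equal_get_tcp_flags_py : Prop := ∀ (flags : Int), Dom_get_tcp_flags_py flags → Spec_get_tcp_flags_py flags (get_tcp_flags_py flags)

-- ===== LEMMAS AND PROOFS =====

-- x &&& 255 = x % 256 on Nat, with the literal 255
theorem pv_nat_and_255 (x : Nat) : x &&& 255 = x % 256 := by
  have h := Nat.and_two_pow_sub_one_eq_mod x 8
  norm_num at h
  exact h

-- b &&& m depends only on m % 256 when b < 256
theorem pv_and_mod (b m : Nat) (hb : b < 256) : b &&& m = b &&& (m % 256) := by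
  have h255 : b &&& 255 = b := by rw [pv_nat_and_255]; omega
  calc b &&& m = (b &&& 255) &&& m := by rw [h255]
    _ = b &&& (255 &&& m) := Nat.and_assoc ..
    _ = b &&& (m % 256) := by rw [Nat.and_comm 255 m, pv_nat_and_255]

-- band with a negative left argument, spelled out from the definition
theorem pv_band_neg (a b : Int) (ha : a < 0) (hb : 0 ≤ b) :
    PySem.Int.band a b = ((b.toNat - (b.toNat &&& (-a - 1).toNat) : Nat) : Int) := by
  rw [PySem.Int.band.eq_1, if_neg (not_le.mpr ha), if_pos hb]

-- the key reduction: each of A's bit tests sees only flags & 255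
theorem pv_band_band255 (a : Int) (b : Nat) (hb : b < 256)
    (hnat : ∀ t : Nat, t < 256 → (255 - (255 &&& t)) &&& b = b - (b &&& t % 256)) :
    PySem.Int.band (PySem.Int.band a 255) (b : Int) = PySem.Int.band a (b : Int) := by
  have hbi : (0 : Int) ≤ (b : Int) := by positivity
  have e255 : (255 : Int).toNat = 255 := rfl
  by_cases ha : 0 ≤ a
  · rw [PySem.Int.band_of_nonneg ha (by norm_num : (0:Int) ≤ 255),
       PySem.Int.band_natCast, PySem.Int.band_of_nonneg ha hbi]
    rw [e255, Int.toNat_natCast]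
    congr 1
    rw [Nat.and_assoc, Nat.and_comm 255 b, pv_nat_and_255 b]
    congr 1
    omega
  · rw [not_le] at ha
    have h1 := pv_band_neg a 255 ha (by norm_num)
    have h2 := pv_band_neg a (b : Int) ha hbi
    rw [h1, h2, PySem.Int.band_natCast, e255, Int.toNat_natCast]
    congr 1
    set m : Nat := (-a - 1).toNat with hm
    rw [pv_and_mod b m hb]
    have h3 := hnat (m % 256) (Nat.mod_lt _ (by norm_num))
    have h4 : m % 256 % 256 = m % 256 := by omega
    rw [h4] at h3
    rw [← pv_and_mod 255 m (by norm_num)] at h3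
    exact h3

-- A only reads flags through the eight tests flags & 2^i, so A factors through flags & 255
theorem pv_A_reduce (a : Int) : get_tcp_flags_py a = get_tcp_flags_py (PySem.Int.band a 255) := by
  unfold get_tcp_flags_py
  set_option maxRecDepth 20000 in
  have h1 := pv_band_band255 a 1 (by norm_num) (by decide)
  set_option maxRecDepth 20000 in
  have h2 := pv_band_band255 a 2 (by norm_num) (by decide)
  set_option maxRecDepth 20000 in
  have h4 := pv_band_band255 a 4 (by norm_num) (by decide)
  set_option maxRecDepth 20000 in
  have h8 := pv_band_band255 a 8 (by norm_num) (by decide)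
  set_option maxRecDepth 20000 in
  have h16 := pv_band_band255 a 16 (by norm_num) (by decide)
  set_option maxRecDepth 20000 in
  have h32 := pv_band_band255 a 32 (by norm_num) (by decide)
  set_option maxRecDepth 20000 in
  have h64 := pv_band_band255 a 64 (by norm_num) (by decide)
  set_option maxRecDepth 20000 in
  have h128 := pv_band_band255 a 128 (by norm_num) (by decide)
  norm_num at h1 h2 h4 h8 h16 h32 h64 h128
  have hitems : pvFlagMapA.items = [(1, "FIN"), (2, "SYN"), (4, "RST"), (8, "PSH"),
      (16, "ACK"), (32, "URG"), (64, "ECE"), (128, "CWR")] := by decide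
  rw [hitems]
  simp only [List.foldl]
  rw [h1, h2, h4, h8, h16, h32, h64, h128]

-- B reads flags only as flags & 255, and masking is idempotent
set_option maxRecDepth 100000 in
theorem pv_B_reduce (a : Int) : get_tcp_flags_py_alt a = get_tcp_flags_py_alt (PySem.Int.band a 255) := by
  unfold get_tcp_flags_py_alt
  congr 1
  exact (pv_band_band255 a 255 (by norm_num) (by decide)).symm

theorem pv_band255_nonneg (a : Int) : 0 ≤ PySem.Int.band a 255 := by
  rw [PySem.Int.band_comm]
  exact PySem.Int.band_nonneg_of_nonneg_left a (by norm_num)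

theorem pv_band255_lt (a : Int) : PySem.Int.band a 255 < 256 := by
  rw [PySem.Int.band.eq_1]
  by_cases ha : 0 ≤ a
  · simp only [ha, if_pos, (by norm_num : (0:Int) ≤ 255)]
    norm_num
    have : a.toNat &&& (255:Int).toNat ≤ (255:Int).toNat := Nat.and_le_right
    omega
  · simp only [ha, if_pos, (by norm_num : (0 : Int) ≤ 255), if_false]
    norm_num
    omega

-- the finite check over all 256 masked values
set_option maxRecDepth 100000 in
theorem pv_fin_check : ∀ r : Fin 256, get_tcp_flags_py (r : Nat) = get_tcp_flags_py_alt (r : Nat) := by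
  decide

-- ===== VERDICT (by name: the statement is the Claim_ definition above) =====
theorem get_tcp_flags_py_spec : Claim_equal_get_tcp_flags_py := by
  intro flags _
  unfold Spec_get_tcp_flags_py
  rw [pv_A_reduce, pv_B_reduce]
  set r : Int := PySem.Int.band flags 255 with hr
  have h0 := pv_band255_nonneg flags
  have h1 := pv_band255_lt flags
  have hrn : r = ((r.toNat : Nat) : Int) := by omega
  have hlt : r.toNat < 256 := by omega
  rw [hrn]
  exact pv_fin_check ⟨r.toNat, hlt⟩
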